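-- pv_equiv track=rewrite | github.com/Danori/AdventOfCode | 2022/day1/day1.py | sum_and_sort_input
-- ===== SOURCE A (Python) =====
-- def sum_and_sort_input(calorie_input: list[int | None]) -> list[int]:
--     sums, calorie_sum = [], 0
--     for calories in calorie_input:
--         if calories is None:
--             sums.append(calorie_sum)
--             calorie_sum = 0
--         else:
--             calorie_sum += calories
--     return sorted(sums, reverse=True)
-- ===== SOURCE B (Python) =====
-- def sum_and_sort_input(calorie_input: list[int | None]) -> list[int]:
--     # Different decomposition: first collect the separator indices, then sum the
--     # disjoint slices between consecutive separators (trailing partial group dropped).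
--     sep = [i for i, x in enumerate(calorie_input) if x is None]
--     result, prev = [], 0
--     for idx in sep:
--         result.append(sum(x for x in calorie_input[prev:idx] if x is not None))
--         prev = idx + 1
--     return sorted(result, reverse=True)
-- ===== Notes on version B (the rewrite author's own statement) =====
-- stated objective: alternative
-- what changed: Replaces A's single accumulator fold with a two-phase index decomposition: first collect the indices of the None separators via enumerate, then sum the disjoint slices between consecutive separators (so the trailing partial group is dropped because it has no separator), then sort descending.
import Mathlib
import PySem

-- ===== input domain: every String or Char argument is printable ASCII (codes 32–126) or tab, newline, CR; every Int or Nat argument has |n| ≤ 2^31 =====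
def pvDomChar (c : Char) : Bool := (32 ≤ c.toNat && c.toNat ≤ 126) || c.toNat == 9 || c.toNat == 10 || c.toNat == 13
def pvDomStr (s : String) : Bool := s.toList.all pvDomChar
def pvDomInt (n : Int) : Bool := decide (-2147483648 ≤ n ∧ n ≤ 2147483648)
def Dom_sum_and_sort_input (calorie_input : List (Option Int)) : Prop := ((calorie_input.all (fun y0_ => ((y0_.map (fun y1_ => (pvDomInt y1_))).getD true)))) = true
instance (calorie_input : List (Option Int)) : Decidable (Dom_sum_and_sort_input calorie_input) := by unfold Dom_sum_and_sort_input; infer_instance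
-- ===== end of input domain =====

-- B replaces A's accumulator fold by a two-phase decomposition (collect None indices, then sum the slices between them); alternative decomposition, same cost.


-- ===== PORT A =====
def sum_and_sort_input (calorie_input : List (Option Int)) : List Int :=
  PySem.List.sorted
    (calorie_input.foldl
      (fun (st : List Int × Int) calories =>
        match calories with
        | Option.none => (st.1 ++ [st.2], 0)
        | Option.some v => (st.1, st.2 + v))
      ([], 0)).1
    (fun x => x) true

-- ===== PORT B =====
def sum_and_sort_input_alt (calorie_input : List (Option Int)) : List Int :=
  PySem.List.sorted
    ((((PySem.List.enumerate calorie_input 0).filter (fun q => q.2.isNone)).map (·.1)).foldl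
      (fun (st : List Int × Int) idx =>
        (st.1 ++ [((PySem.List.slice calorie_input (Option.some st.2) (Option.some idx)).filterMap id).sum],
         idx + 1))
      ([], 0)).1
    (fun x => x) true

-- ===== PRECONDITION & SPEC =====
def Spec_sum_and_sort_input (calorie_input : List (Option Int)) (out : List Int) : Prop := out = sum_and_sort_input_alt calorie_input
instance (calorie_input : List (Option Int)) (out : List Int) : Decidable (Spec_sum_and_sort_input calorie_input out) := by unfold Spec_sum_and_sort_input; infer_instance

-- ===== CLAIM (what is proved, stated in full; the proofs are below) =====
def Claim_equal_sum_and_sort_input : Prop := ∀ (calorie_input : List (Option Int)), Dom_sum_and_sort_input calorie_input → Spec_sum_and_sort_input calorie_input (sum_and_sort_input calorie_input)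

-- ===== LEMMAS AND PROOFS =====

-- reference group-sum list: one entry per None, accumulator c
def pvGSpec (xs : List (Option Int)) (c : Int) : List Int :=
  match xs with
  | [] => []
  | Option.none :: t => c :: pvGSpec t 0
  | Option.some v :: t => pvGSpec t (c + v)

theorem pvFoldA_eq (xs : List (Option Int)) : ∀ (sums : List Int) (c : Int),
    (xs.foldl
      (fun (st : List Int × Int) calories =>
        match calories with
        | Option.none => (st.1 ++ [st.2], 0)
        | Option.some v => (st.1, st.2 + v))
      (sums, c)).1 = sums ++ pvGSpec xs c := by
  induction xs with
  | nil => intro sums c; simp [pvGSpec]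
  | cons x t ih =>
    intro sums c
    cases x with
    | none => simp [List.foldl_cons, pvGSpec, ih, List.append_assoc]
    | some v => simp [List.foldl_cons, pvGSpec, ih]

theorem pvGSpec_no_none (xs : List (Option Int)) (h : Option.none ∉ xs) : ∀ c, pvGSpec xs c = [] := by
  induction xs with
  | nil => intro c; rfl
  | cons x t ih =>
    intro c
    cases x with
    | none => exact absurd (List.mem_cons_self) h
    | some v =>
      simp only [List.mem_cons] at h
      exact pvGSpec.eq_def _ _ ▸ ih (fun ht => h (Or.inr ht)) (c + v)

theorem pvGSpec_split (pre suf : List (Option Int)) (h : Option.none ∉ pre) : ∀ c,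
    pvGSpec (pre ++ Option.none :: suf) c = (c + (pre.filterMap id).sum) :: pvGSpec suf 0 := by
  induction pre with
  | nil => intro c; simp [pvGSpec]
  | cons x p ih =>
    intro c
    cases x with
    | none => exact absurd (List.mem_cons_self) h
    | some v =>
      simp only [List.mem_cons] at h
      have := ih (fun hp => h (Or.inr hp)) (c + v)
      simp only [List.cons_append, pvGSpec, this, List.filterMap_cons, id]
      simp [List.sum_cons, add_assoc]

-- the B loop over the separator indices of l (enumerated from s), with prev = p,
-- where the original list L satisfies L.drop p = mid ++ l with mid the (None-free)
-- already-started part of the current group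
theorem pvFoldB_eq (l : List (Option Int)) :
    ∀ (s p : Nat) (mid : List (Option Int)) (acc : List Int) (L : List (Option Int)),
    L.drop p = mid ++ l → mid.length = s - p → p ≤ s → Option.none ∉ mid →
    ((((PySem.List.enumerate l (s : Int)).filter (fun q => q.2.isNone)).map (·.1)).foldl
      (fun (st : List Int × Int) idx =>
        (st.1 ++ [((PySem.List.slice L (Option.some st.2) (Option.some idx)).filterMap id).sum],
         idx + 1))
      (acc, (p : Int))).1 = acc ++ pvGSpec (mid ++ l) 0 := by
  induction l with
  | nil =>
    intro s p mid acc L _ _ _ hmem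
    simp [PySem.List.enumerate_nil, pvGSpec_no_none _ (by simpa using hmem)]
  | cons x t ih =>
    intro s p mid acc L hdropL hlen hps hmem
    cases x with
    | some v =>
      rw [PySem.List.enumerate_cons]
      have hcast : ((s : Int) + 1) = (((s + 1 : Nat) : Int)) := by push_cast; ring
      simp only [List.filter_cons, Option.isNone_some, Bool.false_eq_true, if_false, hcast]
      have h1 : L.drop p = (mid ++ [Option.some v]) ++ t := by
        rw [hdropL]; simp
      have h2 : (mid ++ [Option.some v]).length = (s + 1) - p := by
        simp; omega
      have h3 : Option.none ∉ mid ++ [Option.some v] := by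
        simpa using hmem
      have := ih (s + 1) p (mid ++ [Option.some v]) acc L h1 h2 (by omega) h3
      rw [this]
      simp
    | none =>
      rw [PySem.List.enumerate_cons]
      have hcast : ((s : Int) + 1) = (((s + 1 : Nat) : Int)) := by push_cast; ring
      simp only [List.filter_cons, Option.isNone_none, if_true, List.map_cons, List.foldl_cons, hcast]
      -- the appended value: the slice L[p:s] is exactly mid
      have hslice : PySem.List.slice L (Option.some (p : Int)) (Option.some (s : Int)) = mid := by
        rw [PySem.List.slice_natCast, hdropL, ← hlen]
        simp
      rw [hslice]
      -- recurse on t with prev = s + 1, empty mid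
      have hdrop' : L.drop (s + 1) = [] ++ t := by
        have hd : L.drop (s + 1) = (L.drop p).drop (mid.length + 1) := by
          rw [List.drop_drop]; congr 1; omega
        rw [hd, hdropL]
        simp
      have := ih (s + 1) (s + 1) [] (acc ++ [(mid.filterMap id).sum]) L hdrop' (by simp) (le_refl _) (by simp)
      rw [this, pvGSpec_split mid t hmem 0]
      simp

-- ===== VERDICT (by name: the statement is the Claim_ definition above) =====
theorem sum_and_sort_input_spec : Claim_equal_sum_and_sort_input := by
  intro l _
  unfold Spec_sum_and_sort_input sum_and_sort_input sum_and_sort_input_alt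
  rw [pvFoldA_eq]
  have := pvFoldB_eq l 0 0 [] [] l (by simp) (by simp) (le_refl _) (by simp)
  simp only [Nat.cast_zero] at this
  rw [this]
  simp
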